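-- pv_equiv track=rewrite | github.com/TomReilly1/mb2hub | tools/reduce/armors.py | handle_armor_rating_values
-- ===== SOURCE A (Python) =====
-- def handle_armor_rating_values(armor_type: str, prefix: dict) -> dict:
--     armor_val_dict = {
--         'head_armor': None,
--         'body_armor': None,
--         'arm_armor': None,
--         'leg_armor': None
--     }
--
--     match armor_type:
--         case 'HeadArmor':
--             armor_val_dict['head_armor'] = (prefix.get('@head_armor')
--                                             if prefix.get('@head_armor') else 0)
--         case 'ShoulderArmor':
--             armor_val_dict['body_armor'] = (prefix.get('@body_armor')
--                                             if prefix.get('@body_armor') else 0)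
--             armor_val_dict['arm_armor'] = (prefix.get('@arm_armor')
--                                             if prefix.get('@arm_armor') else 0)
--         case 'BodyArmor':
--             armor_val_dict['body_armor'] = (prefix.get('@body_armor')
--                                             if prefix.get('@body_armor') else 0)
--             armor_val_dict['arm_armor'] = (prefix.get('@arm_armor')
--                                             if prefix.get('@arm_armor') else 0)
--             armor_val_dict['leg_armor'] = (prefix.get('@leg_armor')
--                                             if prefix.get('@leg_armor') else 0)
--         case 'ArmArmor':
--             armor_val_dict['arm_armor'] = (prefix.get('@arm_armor')
--                                             if prefix.get('@arm_armor') else 0)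
--         case 'LegArmor':
--             armor_val_dict['leg_armor'] = (prefix.get('@leg_armor')
--                                             if prefix.get('@leg_armor') else 0)
--         case _:
--             raise Exception('unkown armor type')
--
--     for key, val in armor_val_dict.items():
--         if val:
--             armor_val_dict[key] = int(val)
--
--     return armor_val_dict
-- ===== SOURCE B (Python) =====
-- _ARMOR_KEYS = {
--     'HeadArmor': ('head_armor',),
--     'ShoulderArmor': ('body_armor', 'arm_armor'),
--     'BodyArmor': ('body_armor', 'arm_armor', 'leg_armor'),
--     'ArmArmor': ('arm_armor',),
--     'LegArmor': ('leg_armor',),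
-- }
--
-- def handle_armor_rating_values(armor_type: str, prefix: dict) -> dict:
--     keys = _ARMOR_KEYS.get(armor_type)
--     if keys is None:
--         raise Exception('unkown armor type')
--
--     def rating(key):
--         v = prefix.get('@' + key)
--         return int(v) if v else 0
--
--     return {k: (rating(k) if k in keys else None)
--             for k in ('head_armor', 'body_armor', 'arm_armor', 'leg_armor')}
-- ===== Notes on version B (the rewrite author's own statement) =====
-- stated objective: simpler
-- what changed: Replaces the five-branch match that mutates a dict plus a second int-conversion pass with a static armor-type -> key-list table and a single comprehension over the four rating keys that converts each selected value in place.
import Mathlib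
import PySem

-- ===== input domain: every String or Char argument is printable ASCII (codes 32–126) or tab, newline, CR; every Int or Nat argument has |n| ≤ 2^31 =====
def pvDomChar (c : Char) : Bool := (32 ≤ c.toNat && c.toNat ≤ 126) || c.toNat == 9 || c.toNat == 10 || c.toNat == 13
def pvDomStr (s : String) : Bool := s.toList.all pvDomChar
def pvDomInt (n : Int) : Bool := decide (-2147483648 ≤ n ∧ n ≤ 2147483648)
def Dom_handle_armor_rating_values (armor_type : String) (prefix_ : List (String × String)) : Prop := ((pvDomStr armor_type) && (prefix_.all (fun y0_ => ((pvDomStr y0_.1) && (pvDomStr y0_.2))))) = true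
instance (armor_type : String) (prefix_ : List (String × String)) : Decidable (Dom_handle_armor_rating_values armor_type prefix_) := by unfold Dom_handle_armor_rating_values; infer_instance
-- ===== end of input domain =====

-- B replaces A's five-branch match + second int-conversion pass with a static
-- armor-type -> key-list table and one comprehension over the four rating keys (simpler).


-- ===== PORT A =====
-- values held in armor_val_dict during A's run: None, an int, or a string from prefix
inductive AVal
  | vnone
  | vint : Int → AVal
  | vstr : String → AVal
deriving DecidableEq, Repr

def avTruthy : AVal → Bool
  | .vnone => false
  | .vint n => n != 0
  | .vstr s => s != ""

-- `prefix.get('@'+k) if prefix.get('@'+k) else 0`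
def aFetch (prefix_ : List (String × String)) (k : String) : AVal :=
  match (PySem.Dict.ofList prefix_).get? k with
  | some s => if s != "" then .vstr s else .vint 0
  | none => .vint 0

-- int(val); none = ValueError
def aIntOf : AVal → Option Int
  | .vnone => none
  | .vint n => some n
  | .vstr s => PySem.Int.ofStr? s

-- loop body: `if val: armor_val_dict[key] = int(val)` (none = ValueError)
def avConv (v : AVal) : Option AVal :=
  if avTruthy v then (aIntOf v).map AVal.vint else some v

-- second loop: `for key, val in armor_val_dict.items(): if val: armor_val_dict[key] = int(val)`
-- (keys are distinct, so overwriting d[key] in place = rewriting the item in order)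
def aConvLoop : List (String × AVal) → Option (List (String × AVal))
  | [] => some []
  | (k, v) :: rest => (avConv v).bind fun v' => (aConvLoop rest).map (((k, v')) :: ·)

-- final dict values are None or int; vstr is unreachable after the conversion loop
def aRepr : AVal → Option Int
  | .vnone => none
  | .vint n => some n
  | .vstr _ => none

def aCore (armor_type : String) (prefix_ : List (String × String)) : Option (List (String × Option Int)) :=
  let d0 : PySem.Dict String AVal :=
    PySem.Dict.ofList [("head_armor", .vnone), ("body_armor", .vnone), ("arm_armor", .vnone), ("leg_armor", .vnone)]
  let d? : Option (PySem.Dict String AVal) :=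
    if armor_type = "HeadArmor" then
      some (d0.insert "head_armor" (aFetch prefix_ "@head_armor"))
    else if armor_type = "ShoulderArmor" then
      some ((d0.insert "body_armor" (aFetch prefix_ "@body_armor")).insert "arm_armor" (aFetch prefix_ "@arm_armor"))
    else if armor_type = "BodyArmor" then
      some (((d0.insert "body_armor" (aFetch prefix_ "@body_armor")).insert "arm_armor" (aFetch prefix_ "@arm_armor")).insert "leg_armor" (aFetch prefix_ "@leg_armor"))
    else if armor_type = "ArmArmor" then
      some (d0.insert "arm_armor" (aFetch prefix_ "@arm_armor"))
    else if armor_type = "LegArmor" then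
      some (d0.insert "leg_armor" (aFetch prefix_ "@leg_armor"))
    else none  -- raise Exception('unkown armor type')
  match d? with
  | none => none
  | some d =>
    match aConvLoop d.items with
    | none => none  -- ValueError in int(val)
    | some items => some (items.map (fun p => (p.1, aRepr p.2)))

def handle_armor_rating_values (armor_type : String) (prefix_ : List (String × String)) : List (String × Option Int) :=
  (aCore armor_type prefix_).getD []  -- [] only where the Python raises; excluded by Pre_

-- ===== PORT B =====
def bKeys? (armor_type : String) : Option (List String) :=
  if armor_type = "HeadArmor" then some ["head_armor"]
  else if armor_type = "ShoulderArmor" then some ["body_armor", "arm_armor"]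
  else if armor_type = "BodyArmor" then some ["body_armor", "arm_armor", "leg_armor"]
  else if armor_type = "ArmArmor" then some ["arm_armor"]
  else if armor_type = "LegArmor" then some ["leg_armor"]
  else none

-- rating(key) = int(v) if v else 0; none = ValueError
def bRating (prefix_ : List (String × String)) (k : String) : Option Int :=
  match (PySem.Dict.ofList prefix_).get? ("@" ++ k) with
  | some s => if s ≠ "" then PySem.Int.ofStr? s else some 0
  | none => some 0

def bCore (armor_type : String) (prefix_ : List (String × String)) : Option (List (String × Option Int)) :=
  (bKeys? armor_type).bind fun keys =>
    (["head_armor", "body_armor", "arm_armor", "leg_armor"].mapM fun k =>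
      if keys.contains k then (bRating prefix_ k).map (fun n => (k, some n)) else some (k, none))

def handle_armor_rating_values_alt (armor_type : String) (prefix_ : List (String × String)) : List (String × Option Int) :=
  (bCore armor_type prefix_).getD []  -- [] only where the Python raises; excluded by Pre_

-- ===== PRECONDITION & SPEC =====
-- `int(val)` parses for the value at key '@'++k (if present and non-empty)
def preParseOK (prefix_ : List (String × String)) (kk : String) : Bool :=
  match (PySem.Dict.ofList prefix_).get? kk with
  | some s => s == "" || (PySem.Int.ofStr? s).isSome
  | none => true

-- Pre_ excludes exactly the raising inputs: unknown armor types (Exception) and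
-- prefix values at the affected keys on which int() raises ValueError.
def Pre_handle_armor_rating_values (armor_type : String) (prefix_ : List (String × String)) : Prop :=
  (armor_type = "HeadArmor" ∧ preParseOK prefix_ "@head_armor" = true) ∨
  (armor_type = "ShoulderArmor" ∧ preParseOK prefix_ "@body_armor" = true ∧ preParseOK prefix_ "@arm_armor" = true) ∨
  (armor_type = "BodyArmor" ∧ preParseOK prefix_ "@body_armor" = true ∧ preParseOK prefix_ "@arm_armor" = true ∧ preParseOK prefix_ "@leg_armor" = true) ∨
  (armor_type = "ArmArmor" ∧ preParseOK prefix_ "@arm_armor" = true) ∨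
  (armor_type = "LegArmor" ∧ preParseOK prefix_ "@leg_armor" = true)

instance (armor_type : String) (prefix_ : List (String × String)) : Decidable (Pre_handle_armor_rating_values armor_type prefix_) := by
  unfold Pre_handle_armor_rating_values; infer_instance

def pvWitness_handle_armor_rating_values : String × (List (String × String)) :=
  ("BodyArmor", [("@body_armor", "12"), ("@leg_armor", "")])

def Spec_handle_armor_rating_values (armor_type : String) (prefix_ : List (String × String)) (out : List (String × Option Int)) : Prop := out = handle_armor_rating_values_alt armor_type prefix_
instance (armor_type : String) (prefix_ : List (String × String)) (out : List (String × Option Int)) : Decidable (Spec_handle_armor_rating_values armor_type prefix_ out) := by unfold Spec_handle_armor_rating_values; infer_instance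

-- ===== CLAIM (what is proved, stated in full; the proofs are below) =====
def Claim_equal_handle_armor_rating_values : Prop := ∀ (armor_type : String) (prefix_ : List (String × String)), Dom_handle_armor_rating_values armor_type prefix_ → Pre_handle_armor_rating_values armor_type prefix_ → Spec_handle_armor_rating_values armor_type prefix_ (handle_armor_rating_values armor_type prefix_)


-- ===== LEMMAS AND PROOFS =====
-- under preParseOK, one looked-up value converts to the same int on both sides
theorem fetch_conv (prefix_ : List (String × String)) (k kk : String) (he : kk = "@" ++ k)
    (hp : preParseOK prefix_ kk = true) :
    ∃ n : Int, bRating prefix_ k = some n ∧ avConv (aFetch prefix_ kk) = some (AVal.vint n) := by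
  subst he
  unfold preParseOK at hp
  unfold bRating aFetch
  cases h : (PySem.Dict.ofList prefix_).get? ("@" ++ k) with
  | none => exact ⟨0, rfl, rfl⟩
  | some s =>
    rw [h] at hp
    by_cases hs : s = ""
    · subst hs; exact ⟨0, rfl, rfl⟩
    · simp [hs] at hp ⊢
      obtain ⟨n, hn⟩ := Option.isSome_iff_exists.mp hp
      exact ⟨n, hn, by simp [avConv, avTruthy, aIntOf, hs, hn]⟩

theorem avConv_vnone : avConv AVal.vnone = some AVal.vnone := rfl

-- ===== VERDICT (by name: the statement is the Claim_ definition above) =====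
theorem handle_armor_rating_values_spec : Claim_equal_handle_armor_rating_values := by
  intro armor_type prefix_ _ hpre
  unfold Spec_handle_armor_rating_values
  rcases hpre with ⟨h, hp1⟩ | ⟨h, hp1, hp2⟩ | ⟨h, hp1, hp2, hp3⟩ | ⟨h, hp1⟩ | ⟨h, hp1⟩ <;> subst h
  · obtain ⟨n1, hb1, hc1⟩ := fetch_conv prefix_ "head_armor" "@head_armor" rfl hp1
    simp [handle_armor_rating_values, handle_armor_rating_values_alt, aCore, bCore, bKeys?,
      PySem.Dict.insert, PySem.Dict.ofList, PySem.Dict.update, PySem.Dict.contains, PySem.Dict.empty,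
      aConvLoop, hb1, hc1, avConv_vnone, aRepr]
  · obtain ⟨n1, hb1, hc1⟩ := fetch_conv prefix_ "body_armor" "@body_armor" rfl hp1
    obtain ⟨n2, hb2, hc2⟩ := fetch_conv prefix_ "arm_armor" "@arm_armor" rfl hp2
    simp [handle_armor_rating_values, handle_armor_rating_values_alt, aCore, bCore, bKeys?,
      PySem.Dict.insert, PySem.Dict.ofList, PySem.Dict.update, PySem.Dict.contains, PySem.Dict.empty,
      aConvLoop, hb1, hc1, hb2, hc2, avConv_vnone, aRepr]
  · obtain ⟨n1, hb1, hc1⟩ := fetch_conv prefix_ "body_armor" "@body_armor" rfl hp1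
    obtain ⟨n2, hb2, hc2⟩ := fetch_conv prefix_ "arm_armor" "@arm_armor" rfl hp2
    obtain ⟨n3, hb3, hc3⟩ := fetch_conv prefix_ "leg_armor" "@leg_armor" rfl hp3
    simp [handle_armor_rating_values, handle_armor_rating_values_alt, aCore, bCore, bKeys?,
      PySem.Dict.insert, PySem.Dict.ofList, PySem.Dict.update, PySem.Dict.contains, PySem.Dict.empty,
      aConvLoop, hb1, hc1, hb2, hc2, hb3, hc3, avConv_vnone, aRepr]
  · obtain ⟨n1, hb1, hc1⟩ := fetch_conv prefix_ "arm_armor" "@arm_armor" rfl hp1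
    simp [handle_armor_rating_values, handle_armor_rating_values_alt, aCore, bCore, bKeys?,
      PySem.Dict.insert, PySem.Dict.ofList, PySem.Dict.update, PySem.Dict.contains, PySem.Dict.empty,
      aConvLoop, hb1, hc1, avConv_vnone, aRepr]
  · obtain ⟨n1, hb1, hc1⟩ := fetch_conv prefix_ "leg_armor" "@leg_armor" rfl hp1
    simp [handle_armor_rating_values, handle_armor_rating_values_alt, aCore, bCore, bKeys?,
      PySem.Dict.insert, PySem.Dict.ofList, PySem.Dict.update, PySem.Dict.contains, PySem.Dict.empty,
      aConvLoop, hb1, hc1, avConv_vnone, aRepr]
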